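-- pv_equiv track=rewrite | github.com/ispoleet/ctf-writeups | midnight_sun_ctf_2024/roprot/roprot_keygen.py | hash_license_key
-- ===== SOURCE A (Python) =====
-- def hash_license_key(lic_key):
--     """Computes the 16-bit mini hash from license key."""
--     chksum = 0
--
--     for k in lic_key:
--         if k >= ord('0') and k <= ord('9'):
--             c = k - 0x30
--         elif k >= ord('A') and k <= ord('Z'):
--             c = k - 0x37
--         else:
--             continue  # Skip '-'
--
--         chksum  = 36*chksum + c  # Base 36
--         chksum &= 0xFFFFFFFFFFFFFFFF
--
--     seed = (chksum >> 32) ^ (chksum & 0xFFFFFFFF)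
--     # If mini hash ss 0x2cc2, then license key is correct.
--     return compute_minihash(seed)
--
-- def compute_minihash(num):
--     """Computes the mini hash of a 32-bit number."""
--     chksum = 0xFFFF
--     for n in num.to_bytes(4, 'little'):
--         chksum ^= n << 8
--         chksum &= 0xFFFF
--
--         for j in range(8):  # A Galois Field multiplication.
--             if (chksum & 0x8000) == 0:
--                 chksum *= 2
--             else:
--                 chksum = (2 * chksum) ^ 0x1021
--
--         chksum &= 0xFFFF
--
--     return chksum
-- ===== SOURCE B (Python) =====
-- # Table-driven CRC-16/XMODEM instead of bit-by-bit Galois steps; digits extracted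
-- # by a generator instead of in-loop branching.
--
-- def _crc_entry(b):
--     x = b << 8
--     for _ in range(8):
--         if (x & 0x8000) == 0:
--             x = x << 1
--         else:
--             x = (x << 1) ^ 0x1021
--     return x & 0xFFFF
--
-- _TABLE = [_crc_entry(b) for b in range(256)]
--
-- def _digit_values(lic_key):
--     for k in lic_key:
--         if 48 <= k <= 57:
--             yield k - 48
--         elif 65 <= k <= 90:
--             yield k - 55
--
-- def hash_license_key(lic_key):
--     acc = 0
--     for c in _digit_values(lic_key):
--         acc = (36 * acc + c) & 0xFFFFFFFFFFFFFFFF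
--     seed = (acc >> 32) ^ (acc & 0xFFFFFFFF)
--     chk = 0xFFFF
--     for n in seed.to_bytes(4, 'little'):
--         chk = ((chk << 8) & 0xFFFF) ^ _TABLE[((chk >> 8) ^ n) & 0xFF]
--     return chk
-- ===== Notes on version B (the rewrite author's own statement) =====
-- stated objective: alternative
-- what changed: The CRC-16 is computed via a precomputed 256-entry table (one XOR/lookup per byte) instead of 8 Galois bit-steps per byte, and the base-36 digit values are produced by a generator consumed by the accumulation loop instead of branch-and-continue inside it.
import Mathlib
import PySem

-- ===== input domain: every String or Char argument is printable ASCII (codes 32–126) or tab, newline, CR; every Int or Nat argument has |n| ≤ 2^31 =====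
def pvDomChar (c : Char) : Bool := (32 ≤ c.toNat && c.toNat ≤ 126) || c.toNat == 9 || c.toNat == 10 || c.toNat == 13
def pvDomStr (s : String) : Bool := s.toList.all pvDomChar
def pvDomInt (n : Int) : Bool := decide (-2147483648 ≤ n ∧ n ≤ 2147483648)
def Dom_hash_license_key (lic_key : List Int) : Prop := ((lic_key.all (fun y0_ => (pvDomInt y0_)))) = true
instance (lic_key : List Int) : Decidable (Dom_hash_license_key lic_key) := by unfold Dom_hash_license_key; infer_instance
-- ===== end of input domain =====

-- B computes the CRC-16 with a precomputed 256-entry table (one lookup per byte) instead of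
-- 8 Galois bit-steps per byte, and feeds the base-36 loop from a digit-value generator
-- (filterMap) instead of branch-and-continue inside the loop; same return value.

-- ===== PORT A =====
-- one iteration of A's base-36 accumulation loop (the `continue` branch leaves chksum unchanged)
def aDigitStep (chksum k : Int) : Int :=
  if 48 ≤ k ∧ k ≤ 57 then Int.land (36 * chksum + (k - 48)) 0xFFFFFFFFFFFFFFFF
  else if 65 ≤ k ∧ k ≤ 90 then Int.land (36 * chksum + (k - 55)) 0xFFFFFFFFFFFFFFFF
  else chksum

-- one step of the `for j in range(8)` Galois-multiplication loop
def aGfStep (chksum : Int) : Int :=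
  if Int.land chksum 0x8000 = 0 then 2 * chksum else Int.xor (2 * chksum) 0x1021

-- body of `for n in num.to_bytes(4, 'little')`
def aByteStep (chksum n : Int) : Int :=
  let c := Int.land (Int.xor chksum (n <<< (8 : Int))) 0xFFFF
  Int.land ((List.range 8).foldl (fun c _ => aGfStep c) c) 0xFFFF

def compute_minihash (num : Int) : Int :=
  -- num.to_bytes(4, 'little'): exact for 0 ≤ num < 2^32 (always the case at the call site)
  let bytes : List Int :=
    [Int.land num 0xFF, Int.land (num >>> (8 : Int)) 0xFF,
     Int.land (num >>> (16 : Int)) 0xFF, Int.land (num >>> (24 : Int)) 0xFF]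
  bytes.foldl aByteStep 0xFFFF

def hash_license_key (lic_key : List Int) : Int :=
  let chksum := lic_key.foldl aDigitStep 0
  let seed := Int.xor (chksum >>> (32 : Int)) (Int.land chksum 0xFFFFFFFF)
  compute_minihash seed

-- ===== PORT B =====
-- Source B's _crc_entry
def bCrcEntry (b : Int) : Int :=
  Int.land ((List.range 8).foldl
    (fun x _ => if Int.land x 0x8000 = 0 then x <<< (1 : Int) else Int.xor (x <<< (1 : Int)) 0x1021)
    (b <<< (8 : Int))) 0xFFFF

-- Source B's _TABLE = [_crc_entry(b) for b in range(256)]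
def bTable : List Int := (PySem.List.pyRange 0 256 1).map bCrcEntry

-- Source B's _digit_values generator, as the function one yielded element comes from
def bDigitVal (k : Int) : Option Int :=
  if 48 ≤ k ∧ k ≤ 57 then some (k - 48)
  else if 65 ≤ k ∧ k ≤ 90 then some (k - 55)
  else none

-- body of Source B's accumulation loop
def bAccStep (acc c : Int) : Int := Int.land (36 * acc + c) 0xFFFFFFFFFFFFFFFF

-- body of Source B's CRC loop; _TABLE[i]: the index is always in [0, 256), so the default is never used
def bByteStep (chk n : Int) : Int :=
  Int.xor (Int.land (chk <<< (8 : Int)) 0xFFFF)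
    (PySem.List.pyGetD bTable (Int.land (Int.xor (chk >>> (8 : Int)) n) 0xFF) 0)

def hash_license_key_alt (lic_key : List Int) : Int :=
  let acc := (lic_key.filterMap bDigitVal).foldl bAccStep 0
  let seed := Int.xor (acc >>> (32 : Int)) (Int.land acc 0xFFFFFFFF)
  -- seed.to_bytes(4, 'little'): exact for 0 ≤ seed < 2^32 (always the case here)
  let bytes : List Int :=
    [Int.land seed 0xFF, Int.land (seed >>> (8 : Int)) 0xFF,
     Int.land (seed >>> (16 : Int)) 0xFF, Int.land (seed >>> (24 : Int)) 0xFF]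
  bytes.foldl bByteStep 0xFFFF

-- ===== PRECONDITION & SPEC =====
def Spec_hash_license_key (lic_key : List Int) (out : Int) : Prop := out = hash_license_key_alt lic_key
instance (lic_key : List Int) (out : Int) : Decidable (Spec_hash_license_key lic_key out) := by unfold Spec_hash_license_key; infer_instance

-- ===== CLAIM (what is proved, stated in full; the proofs are below) =====
def Claim_equal_hash_license_key : Prop := ∀ (lic_key : List Int), Dom_hash_license_key lic_key → Spec_hash_license_key lic_key (hash_license_key lic_key)

-- ===== LEMMAS AND PROOFS =====

-- Nat-level mirror of one Galois step and of the whole 8-step multiplication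
def gstep (x : Nat) : Nat := if x &&& 0x8000 = 0 then 2 * x else (2 * x) ^^^ 0x1021
def gstep8 (x : Nat) : Nat := gstep (gstep (gstep (gstep (gstep (gstep (gstep (gstep x)))))))
-- Nat-level mirror of A's per-byte step
def natAStep (c n : Nat) : Nat := gstep8 ((c ^^^ (n <<< 8)) &&& 0xFFFF) &&& 0xFFFF

-- ---- Int ↔ Nat casts ----
theorem land_coe (a b : Nat) : Int.land (a : Int) (b : Int) = ((a &&& b : Nat) : Int) := rfl
theorem xor_coe (a b : Nat) : Int.xor (a : Int) (b : Int) = ((a ^^^ b : Nat) : Int) := rfl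
theorem shiftR_coe (x k : Nat) : (x : Int) >>> (k : Int) = ((x >>> k : Nat) : Int) :=
  Int.shiftRight_natCast x k
theorem shiftL_coe (x k : Nat) : (x : Int) <<< (k : Int) = ((x <<< k : Nat) : Int) :=
  Int.shiftLeft_natCast x k

theorem gstep_coe (x : Nat) : aGfStep (x : Int) = ((gstep x : Nat) : Int) := by
  unfold aGfStep gstep
  rw [show (0x8000 : Int) = ((0x8000 : Nat) : Int) from rfl, land_coe,
    show (2 * (x : Int)) = ((2 * x : Nat) : Int) by push_cast; ring,
    show (0x1021 : Int) = ((0x1021 : Nat) : Int) from rfl, xor_coe]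
  split_ifs with h h' h' <;> simp_all

theorem bstep_coe (x : Nat) :
    (if Int.land (x : Int) 0x8000 = 0 then (x : Int) <<< (1 : Int) else Int.xor ((x : Int) <<< (1 : Int)) 0x1021)
      = ((gstep x : Nat) : Int) := by
  rw [show (0x8000 : Int) = ((0x8000 : Nat) : Int) from rfl, land_coe,
    show ((x : Int) <<< (1 : Int)) = ((x <<< 1 : Nat) : Int) from shiftL_coe x 1,
    show (0x1021 : Int) = ((0x1021 : Nat) : Int) from rfl, xor_coe]
  unfold gstep
  rw [Nat.shiftLeft_eq]
  split_ifs with h h' h' <;> simp_all [Nat.mul_comm]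

-- ---- core Galois-field facts ----
theorem two_mul_xor (a b : Nat) : 2 * (a ^^^ b) = 2 * a ^^^ 2 * b := by
  simpa [Nat.shiftLeft_eq, Nat.mul_comm] using Nat.shiftLeft_xor_distrib (a := a) (b := b) (i := 1)

theorem and_msb (a : Nat) : a &&& 0x8000 = 0 ∨ a &&& 0x8000 = 0x8000 := by
  have := Nat.and_two_pow a 15
  rcases Bool.eq_false_or_eq_true (a.testBit 15) with h | h <;> simp [h] at this <;> omega

theorem gstep_xor (a b : Nat) : gstep (a ^^^ b) = gstep a ^^^ gstep b := by
  unfold gstep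
  have h : (a ^^^ b) &&& 0x8000 = (a &&& 0x8000) ^^^ (b &&& 0x8000) := Nat.and_xor_distrib_right
  rcases and_msb a with ha | ha <;> rcases and_msb b with hb | hb <;>
    simp [ha, hb, h, two_mul_xor, Nat.xor_assoc, Nat.xor_comm, Nat.xor_left_comm]

theorem gstep8_xor (a b : Nat) : gstep8 (a ^^^ b) = gstep8 a ^^^ gstep8 b := by
  simp [gstep8, gstep_xor]

theorem gstep_small (x : Nat) (hx : x < 32768) : gstep x = 2 * x := by
  have h : x &&& 0x8000 = 0 := by
    have h2 := Nat.and_two_pow x 15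
    simp [Nat.testBit_lt_two_pow (show x < 2 ^ 15 by omega)] at h2; omega
  simp [gstep, h]

theorem gstep8_low (l : Nat) (hl : l < 256) : gstep8 l = l * 256 := by
  unfold gstep8
  rw [gstep_small l (by omega), gstep_small (2*l) (by omega), gstep_small (2*(2*l)) (by omega),
    gstep_small _ (by omega : 2*(2*(2*l)) < 32768), gstep_small _ (by omega : 2*(2*(2*(2*l))) < 32768),
    gstep_small _ (by omega : 2*(2*(2*(2*(2*l)))) < 32768),
    gstep_small _ (by omega : 2*(2*(2*(2*(2*(2*l))))) < 32768),
    gstep_small _ (by omega : 2*(2*(2*(2*(2*(2*(2*l)))))) < 32768)]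
  ring

theorem or_eq_xor_of_and (a b : Nat) (h : a &&& b = 0) : a ||| b = a ^^^ b := by
  apply Nat.eq_of_testBit_eq; intro i
  have hi : ¬(a.testBit i = true ∧ b.testBit i = true) := by
    rintro ⟨h1, h2⟩
    have := congrArg (fun x => x.testBit i) h
    simp [Nat.testBit_and, h1, h2] at this
  simp only [Nat.testBit_or, Nat.testBit_xor]
  cases h1 : a.testBit i <;> cases h2 : b.testBit i <;> simp_all

theorem shift_and_low (m l : Nat) (hl : l < 256) : (m <<< 8) &&& l = 0 := by
  apply Nat.eq_of_testBit_eq; intro i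
  simp only [Nat.testBit_and, Nat.testBit_shiftLeft, Nat.zero_testBit, Bool.and_eq_false_iff]
  by_cases h8 : 8 ≤ i
  · right
    have h2 : (256 : Nat) ≤ 2 ^ i := by
      have := Nat.pow_le_pow_right (show 0 < 2 by omega) h8
      simpa using this
    exact Nat.testBit_lt_two_pow (by omega)
  · left; simp [h8]

theorem split_c (c : Nat) : c = ((c >>> 8) <<< 8) ^^^ (c % 256) := by
  have h1 : (c >>> 8) <<< 8 = 2 ^ 8 * (c / 2 ^ 8) := by
    rw [Nat.shiftRight_eq_div_pow, Nat.shiftLeft_eq]; ring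
  have h2 : 2 ^ 8 * (c / 2 ^ 8) + c % 256 = 2 ^ 8 * (c / 2 ^ 8) ||| c % 256 :=
    Nat.two_pow_add_eq_or_of_lt (by omega) _
  rw [h1, ← or_eq_xor_of_and _ _ (by rw [← h1]; exact shift_and_low _ _ (by omega)), ← h2]
  omega

-- the per-byte step: A's bit-by-bit form = B's table form, at the Nat level
theorem byte_step (c n : Nat) (hc : c < 65536) (hn : n < 256) :
    natAStep c n = ((c <<< 8) &&& 0xFFFF) ^^^ (gstep8 (((c >>> 8) ^^^ n) <<< 8) &&& 0xFFFF) := by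
  unfold natAStep
  have hmask : ∀ x : Nat, x &&& 0xFFFF = x % 65536 := fun x => by
    simpa using Nat.and_two_pow_sub_one_eq_mod x 16
  have hxlt : (c ^^^ (n <<< 8)) < 65536 := by
    apply Nat.xor_lt_two_pow (n := 16) (by omega) (by rw [Nat.shiftLeft_eq]; omega)
  have h1 : (c ^^^ (n <<< 8)) &&& 0xFFFF = c ^^^ (n <<< 8) := by rw [hmask]; omega
  rw [h1]
  have hdist : ((c >>> 8) ^^^ n) <<< 8 = ((c >>> 8) <<< 8) ^^^ (n <<< 8) := Nat.shiftLeft_xor_distrib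
  rw [hdist]
  conv_lhs => rw [split_c c]
  simp only [gstep8_xor]
  rw [gstep8_low (c % 256) (by omega)]
  have hc8 : (c <<< 8) &&& 0xFFFF = (c % 256) * 256 := by rw [Nat.shiftLeft_eq, hmask]; omega
  rw [hc8]
  simp only [Nat.and_xor_distrib_right]
  rw [show (c % 256 * 256) &&& 0xFFFF = c % 256 * 256 by rw [hmask]; omega]
  simp [Nat.xor_comm, Nat.xor_left_comm]

-- ---- the two accumulation loops agree and produce a 64-bit Nat ----
theorem accEq (ks : List Int) : ∀ a : Int,
    (ks.filterMap bDigitVal).foldl bAccStep a = ks.foldl aDigitStep a := by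
  induction ks with
  | nil => intro a; rfl
  | cons k ks ih =>
    intro a
    simp only [List.filterMap_cons, List.foldl_cons]
    by_cases h1 : 48 ≤ k ∧ k ≤ 57
    · rw [show bDigitVal k = some (k - 48) by simp [bDigitVal, h1]]
      simp only [List.foldl_cons]
      rw [show bAccStep a (k - 48) = aDigitStep a k by simp [bAccStep, aDigitStep, h1]]
      exact ih _
    · by_cases h2 : 65 ≤ k ∧ k ≤ 90
      · rw [show bDigitVal k = some (k - 55) by simp [bDigitVal, h1, h2]]
        simp only [List.foldl_cons]
        rw [show bAccStep a (k - 55) = aDigitStep a k by simp [bAccStep, aDigitStep, h1, h2]]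
        exact ih _
      · rw [show bDigitVal k = none by simp [bDigitVal, h1, h2]]
        rw [show aDigitStep a k = a by simp [aDigitStep, h1, h2]]
        exact ih _

theorem accNat (ks : List Int) : ∀ m : Nat, m < 18446744073709551616 →
    ∃ m' : Nat, m' < 18446744073709551616 ∧ ks.foldl aDigitStep (m : Int) = (m' : Int) := by
  induction ks with
  | nil => intro m hm; exact ⟨m, hm, rfl⟩
  | cons k ks ih =>
    intro m hm
    have step : ∀ d : Nat, aDigitStep (m : Int) k = (m : Int) ∨
        (∃ d : Nat, aDigitStep (m : Int) k = (((36 * m + d) &&& 0xFFFFFFFFFFFFFFFF : Nat) : Int)) := by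
      intro _
      unfold aDigitStep
      by_cases h1 : 48 ≤ k ∧ k ≤ 57
      · right; refine ⟨(k - 48).toNat, ?_⟩
        rw [if_pos h1,
          show (36 * (m : Int) + (k - 48)) = (((36 * m + (k - 48).toNat : Nat)) : Int) by
            push_cast [Int.toNat_of_nonneg (by omega : (0:Int) ≤ k - 48)]; ring,
          show (0xFFFFFFFFFFFFFFFF : Int) = ((0xFFFFFFFFFFFFFFFF : Nat) : Int) from rfl, land_coe]
      · by_cases h2 : 65 ≤ k ∧ k ≤ 90
        · right; refine ⟨(k - 55).toNat, ?_⟩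
          rw [if_neg h1, if_pos h2,
            show (36 * (m : Int) + (k - 55)) = (((36 * m + (k - 55).toNat : Nat)) : Int) by
              push_cast [Int.toNat_of_nonneg (by omega : (0:Int) ≤ k - 55)]; ring,
            show (0xFFFFFFFFFFFFFFFF : Int) = ((0xFFFFFFFFFFFFFFFF : Nat) : Int) from rfl, land_coe]
        · left; rw [if_neg h1, if_neg h2]
    rcases step 0 with h | ⟨d, h⟩
    · simpa [h] using ih m hm
    · have hlt : (36 * m + d) &&& 0xFFFFFFFFFFFFFFFF < 18446744073709551616 := by
        have := Nat.and_two_pow_sub_one_eq_mod (36 * m + d) 64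
        norm_num at this ⊢; omega
      simpa [h] using ih _ hlt

-- ---- per-byte steps of both ports are casts of the same Nat value ----
theorem aByte_coe (c n : Nat) : aByteStep (c : Int) (n : Int) = ((natAStep c n : Nat) : Int) := by
  unfold aByteStep natAStep
  rw [show ((n : Int) <<< (8 : Int)) = ((n <<< 8 : Nat) : Int) from shiftL_coe n 8, xor_coe,
    show (0xFFFF : Int) = ((0xFFFF : Nat) : Int) from rfl, land_coe]
  simp only [show List.range 8 = [0, 1, 2, 3, 4, 5, 6, 7] from rfl, List.foldl]
  rw [gstep_coe, gstep_coe, gstep_coe, gstep_coe, gstep_coe, gstep_coe, gstep_coe, gstep_coe,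
    land_coe]
  rfl

theorem bCrcEntry_coe (m : Nat) : bCrcEntry (m : Int) = ((gstep8 (m <<< 8) &&& 0xFFFF : Nat) : Int) := by
  unfold bCrcEntry
  rw [show ((m : Int) <<< (8 : Int)) = ((m <<< 8 : Nat) : Int) from shiftL_coe m 8]
  simp only [show List.range 8 = [0, 1, 2, 3, 4, 5, 6, 7] from rfl, List.foldl]
  rw [bstep_coe, bstep_coe, bstep_coe, bstep_coe, bstep_coe, bstep_coe, bstep_coe, bstep_coe,
    show (0xFFFF : Int) = ((0xFFFF : Nat) : Int) from rfl, land_coe]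
  rfl

theorem bByte_coe (c n : Nat) (hc : c < 65536) (hn : n < 256) :
    bByteStep (c : Int) (n : Int)
      = ((((c <<< 8) &&& 0xFFFF) ^^^ (gstep8 (((c >>> 8) ^^^ n) <<< 8) &&& 0xFFFF) : Nat) : Int) := by
  unfold bByteStep
  have hidx : (c >>> 8) ^^^ n < 256 := by
    apply Nat.xor_lt_two_pow (n := 8) _ (by omega)
    rw [Nat.shiftRight_eq_div_pow]; omega
  rw [show ((c : Int) >>> (8 : Int)) = ((c >>> 8 : Nat) : Int) from shiftR_coe c 8, xor_coe,
    show (0xFF : Int) = ((0xFF : Nat) : Int) from rfl, land_coe,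
    show ((c >>> 8) ^^^ n) &&& 0xFF = (c >>> 8) ^^^ n by
      have := Nat.and_two_pow_sub_one_eq_mod ((c >>> 8) ^^^ n) 8
      norm_num at this ⊢; omega]
  rw [show PySem.List.pyGetD bTable (((c >>> 8) ^^^ n : Nat) : Int) 0
        = bCrcEntry (((c >>> 8) ^^^ n : Nat) : Int) from
      PySem.List.pyGetD_map_pyRange_of_nonneg bCrcEntry 256 _ 0 (by positivity) (by exact_mod_cast hidx)]
  rw [bCrcEntry_coe,
    show ((c : Int) <<< (8 : Int)) = ((c <<< 8 : Nat) : Int) from shiftL_coe c 8,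
    show (0xFFFF : Int) = ((0xFFFF : Nat) : Int) from rfl, land_coe, xor_coe]

theorem natAStep_lt (c n : Nat) : natAStep c n < 65536 := by
  unfold natAStep
  have := Nat.and_two_pow_sub_one_eq_mod (gstep8 ((c ^^^ (n <<< 8)) &&& 0xFFFF)) 16
  norm_num at this ⊢; omega

theorem stepEq (c n : Nat) (hc : c < 65536) (hn : n < 256) :
    aByteStep (c : Int) (n : Int) = bByteStep (c : Int) (n : Int) := by
  rw [aByte_coe, bByte_coe c n hc hn, byte_step c n hc hn]

theorem chain4 (c b0 b1 b2 b3 : Nat) (hc : c < 65536)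
    (h0 : b0 < 256) (h1 : b1 < 256) (h2 : b2 < 256) (h3 : b3 < 256) :
    aByteStep (aByteStep (aByteStep (aByteStep (c : Int) (b0 : Int)) (b1 : Int)) (b2 : Int)) (b3 : Int)
      = bByteStep (bByteStep (bByteStep (bByteStep (c : Int) (b0 : Int)) (b1 : Int)) (b2 : Int)) (b3 : Int) := by
  conv_lhs => rw [aByte_coe c b0, aByte_coe, aByte_coe, aByte_coe]
  conv_rhs => rw [← stepEq c b0 hc h0, aByte_coe c b0,
    ← stepEq _ _ (natAStep_lt c b0) h1, aByte_coe,
    ← stepEq _ _ (natAStep_lt _ _) h2, aByte_coe,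
    ← stepEq _ _ (natAStep_lt _ _) h3, aByte_coe]

-- ===== VERDICT (by name: the statement is the Claim_ definition above) =====
theorem hash_license_key_spec : Claim_equal_hash_license_key := by
  intro lic_key _
  unfold Spec_hash_license_key hash_license_key hash_license_key_alt compute_minihash
  obtain ⟨m, hm, hfold⟩ := accNat lic_key 0 (by omega)
  rw [Nat.cast_zero] at hfold
  simp only [accEq, hfold]
  -- the seed is a 32-bit Nat
  rw [show ((m : Int) >>> (32 : Int)) = ((m >>> 32 : Nat) : Int) from shiftR_coe m 32,
    show (0xFFFFFFFF : Int) = ((0xFFFFFFFF : Nat) : Int) from rfl, land_coe, xor_coe]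
  set s : Nat := (m >>> 32) ^^^ (m &&& 0xFFFFFFFF) with hs
  have hslt : s < 4294967296 := by
    apply Nat.xor_lt_two_pow (n := 32)
    · rw [Nat.shiftRight_eq_div_pow]; omega
    · have := Nat.and_two_pow_sub_one_eq_mod m 32
      norm_num at this ⊢; omega
  -- the four little-endian bytes, as Nats < 256
  have hmod : ∀ (x k : Nat), x &&& (2 ^ k - 1) = x % 2 ^ k := fun x k =>
    Nat.and_two_pow_sub_one_eq_mod x k
  rw [show ((s : Int) >>> (8 : Int)) = ((s >>> 8 : Nat) : Int) from shiftR_coe s 8,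
    show ((s : Int) >>> (16 : Int)) = ((s >>> 16 : Nat) : Int) from shiftR_coe s 16,
    show ((s : Int) >>> (24 : Int)) = ((s >>> 24 : Nat) : Int) from shiftR_coe s 24,
    show (0xFF : Int) = ((0xFF : Nat) : Int) from rfl, land_coe, land_coe, land_coe, land_coe]
  have hb : ∀ x : Nat, x &&& 0xFF < 256 := fun x => by
    have := hmod x 8; norm_num at this ⊢; omega
  -- walk the 4-element fold, byte by byte
  simp only [List.foldl]
  rw [show (0xFFFF : Int) = ((0xFFFF : Nat) : Int) from rfl]
  exact chain4 65535 _ _ _ _ (by omega) (hb s) (hb (s >>> 8)) (hb (s >>> 16)) (hb (s >>> 24))
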